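-- pv_equiv track=rewrite | github.com/manitcs1982/HaveBlue-root | lsdb/views/UnitViewSet.py | encode128
-- ===== SOURCE A (Python) =====
-- def encode128(s):
--     ''' Code 128 conversion for a font as described at
--         https://en.wikipedia.org/wiki/Code_128 and downloaded
--         from http://www.barcodelink.net/barcode-font.php
--         Only encodes ASCII characters, does not take advantage of
--         FNC4 for bytes with the upper bit set.
--         It does not attempt to optimize the length of the string,
--         Code B is the default to prefer lower case over control characters.
--         Coded for https://stackoverflow.com/q/52710760/5987
--     '''
--     s = s.encode('ascii').decode('ascii')
--     if s.isdigit() and len(s) % 2 == 0: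
--         # use Code 128C, pairs of digits
--         codes = [105]
--         for i in range(0, len(s), 2):
--             codes.append(int(s[i:i + 2], 10))
--     else:
--         # use Code 128B and shift for Code 128A
--         mapping = dict((chr(c), [98, c + 64] if c < 32 else [c - 32]) for c in range(128))
--         codes = [104]
--         for c in s:
--             codes.extend(mapping[c])
--     check_digit = (codes[0] + sum(i * x for i, x in enumerate(codes))) % 103
--     codes.append(check_digit)
--     codes.append(106)  # stop code
--     chars = (b'\xd4' + bytes(range(33, 126 + 1)) + bytes(range(200, 211 + 1))).decode('latin-1')
--     return ''.join(chars[x] for x in codes)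
-- ===== SOURCE B (Python) =====
-- def encode128(s):
--     ''' Code 128 barcode-font encoding, single fused pass: the check digit's
--         weighted sum is accumulated while the symbols are emitted, and each
--         code is mapped to its font character immediately instead of building
--         the full code list and re-scanning it with enumerate.
--     '''
--     s = s.encode('ascii').decode('ascii')
--     table = [212, *range(33, 127), *range(200, 212)]
--     if s.isdigit() and len(s) % 2 == 0:
--         out = [chr(table[105])]
--         weighted, k = 105, 1
--         for i in range(0, len(s), 2):
--             v = int(s[i:i + 2], 10)
--             out.append(chr(table[v]))
--             weighted += k * v
--             k += 1
--     else:
--         out = [chr(table[104])]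
--         weighted, k = 104, 1
--         for c in s:
--             o = ord(c)
--             if o < 32:
--                 out.append(chr(table[98]))
--                 weighted += k * 98
--                 k += 1
--                 out.append(chr(table[o + 64]))
--                 weighted += k * (o + 64)
--                 k += 1
--             else:
--                 out.append(chr(table[o - 32]))
--                 weighted += k * (o - 32)
--                 k += 1
--     out.append(chr(table[weighted % 103]))
--     out.append(chr(table[106]))
--     return ''.join(out)
-- ===== Notes on version B (the rewrite author's own statement) =====
-- stated objective: alternative
-- what changed: Fuses the build-then-enumerate two passes into one: the check digit's weighted sum and the output font characters are accumulated while each code is emitted (weight advancing per emitted code, covering the 128B shift pair), replacing the 128-entry mapping dict with direct ord() arithmetic and never materialising the codes list.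
import Mathlib
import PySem

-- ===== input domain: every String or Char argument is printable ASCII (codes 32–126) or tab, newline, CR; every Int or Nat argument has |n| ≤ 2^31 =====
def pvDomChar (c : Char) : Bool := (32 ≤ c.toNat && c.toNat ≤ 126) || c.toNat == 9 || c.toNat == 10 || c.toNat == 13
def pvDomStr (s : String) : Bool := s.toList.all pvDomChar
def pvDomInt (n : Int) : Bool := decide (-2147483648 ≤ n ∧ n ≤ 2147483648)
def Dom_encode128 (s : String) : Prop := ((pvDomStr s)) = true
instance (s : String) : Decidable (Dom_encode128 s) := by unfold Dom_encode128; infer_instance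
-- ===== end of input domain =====

-- B fuses A's build-then-enumerate passes into one accumulator pass (weighted sum and font chars
-- emitted together, ord-arithmetic instead of the 128-entry dict); objective: alternative, same cost.

-- ===== PORT A =====
-- the mapping dict comprehension: dict((chr(c), [98, c + 64] if c < 32 else [c - 32]) for c in range(128))
def pvMappingA : PySem.Dict Char (List Int) :=
  PySem.Dict.ofList ((PySem.List.pyRange 0 128 1).map (fun c =>
    (Char.ofNat c.toNat, if c < 32 then [98, c + 64] else [c - 32])))

-- chars = (b'\xd4' + bytes(range(33, 127)) + bytes(range(200, 212))).decode('latin-1')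
def pvCharsA : List Char := Char.ofNat 212 ::
  (((PySem.List.pyRange 33 127 1).map fun c => Char.ofNat c.toNat) ++
   ((PySem.List.pyRange 200 212 1).map fun c => Char.ofNat c.toNat))

-- the branch building `codes` (s.encode('ascii') raises outside ASCII, i.e. outside Dom; inside Dom it is the identity)
def pvCodesA (s : String) : List Int :=
  if PySem.Str.strIsdigit s && (PySem.Int.mod (PySem.Str.len s) 2 == 0) then
    (PySem.List.pyRange 0 (PySem.Str.len s) 2).foldl
      (fun codes i =>
        codes ++ [(PySem.Int.ofCharsBase? (PySem.List.slice s.toList (some i) (some (i + 2))) 10).getD 0])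
      [105]
  else
    s.toList.foldl (fun codes c => codes ++ (pvMappingA.get? c).getD []) [104]
  -- .getD: int() cannot fail on a digit pair, and the mapping lookup cannot fail on an ASCII key (Dom)

def encode128 (s : String) : String :=
  let codes := pvCodesA s
  let check := PySem.Int.mod
    (PySem.List.pyGetD codes 0 0 +
      (PySem.List.enumerate codes 0).foldl (fun acc p => acc + p.1 * p.2) 0) 103
  String.mk ((codes ++ [check, 106]).map (fun x => PySem.List.pyGetD pvCharsA x ' '))

-- ===== PORT B =====
-- table = [212, *range(33, 127), *range(200, 212)]
def pvTableB : List Int := 212 :: (PySem.List.pyRange 33 127 1 ++ PySem.List.pyRange 200 212 1)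
-- chr(table[v]); exact: every table entry is a valid code point and v is always in range under Dom
def pvSym (v : Int) : Char := Char.ofNat (PySem.List.pyGetD pvTableB v 0).toNat

-- the fused loop: state = (out, weighted, k)
def pvStateB (s : String) : List Char × Int × Int :=
  if PySem.Str.strIsdigit s && (PySem.Int.mod (PySem.Str.len s) 2 == 0) then
    (PySem.List.pyRange 0 (PySem.Str.len s) 2).foldl
      (fun st i =>
        let v := (PySem.Int.ofCharsBase? (PySem.List.slice s.toList (some i) (some (i + 2))) 10).getD 0
        (st.1 ++ [pvSym v], st.2.1 + st.2.2 * v, st.2.2 + 1))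
      ([pvSym 105], 105, 1)
  else
    s.toList.foldl
      (fun st c =>
        let o : Int := c.toNat
        if o < 32 then
          let st1 := (st.1 ++ [pvSym 98], st.2.1 + st.2.2 * 98, st.2.2 + 1)
          (st1.1 ++ [pvSym (o + 64)], st1.2.1 + st1.2.2 * (o + 64), st1.2.2 + 1)
        else
          (st.1 ++ [pvSym (o - 32)], st.2.1 + st.2.2 * (o - 32), st.2.2 + 1))
      ([pvSym 104], 104, 1)

def encode128_alt (s : String) : String :=
  let st := pvStateB s
  String.mk (st.1 ++ [pvSym (PySem.Int.mod st.2.1 103), pvSym 106])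

-- ===== PRECONDITION & SPEC =====
def Spec_encode128 (s : String) (out : String) : Prop := out = encode128_alt s
instance (s : String) (out : String) : Decidable (Spec_encode128 s out) := by unfold Spec_encode128; infer_instance

-- ===== CLAIM (what is proved, stated in full; the proofs are below) =====
def Claim_equal_encode128 : Prop := ∀ (s : String), Dom_encode128 s → Spec_encode128 s (encode128 s)

-- ===== LEMMAS AND PROOFS =====

-- A's check-digit quantity: codes[0] + sum(i * x for i, x in enumerate(codes))
def pvWsum (codes : List Int) : Int :=
  PySem.List.pyGetD codes 0 0 +
    (PySem.List.enumerate codes 0).foldl (fun acc p => acc + p.1 * p.2) 0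

-- the loop invariant tying B's state to A's code list
def pvInv (codes : List Int) (st : List Char × Int × Int) : Prop :=
  st.1 = codes.map (fun x => PySem.List.pyGetD pvCharsA x ' ') ∧
  st.2.1 = pvWsum codes ∧
  st.2.2 = (codes.length : Int) ∧
  codes ≠ [] ∧
  (∀ x ∈ codes, 0 ≤ x ∧ x < 107)

theorem pvFoldlAdd (l : List (Int × Int)) (a : Int) :
    l.foldl (fun acc p => acc + p.1 * p.2) a = a + (l.map (fun p => p.1 * p.2)).sum := by
  induction l generalizing a with
  | nil => simp
  | cons p t ih => simp [List.foldl_cons, ih]; ring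

theorem pvWsum_append (codes : List Int) (v : Int) (h : codes ≠ []) :
    pvWsum (codes ++ [v]) = pvWsum codes + (codes.length : Int) * v := by
  obtain ⟨c0, t, rfl⟩ := List.exists_cons_of_ne_nil h
  unfold pvWsum
  rw [PySem.List.enumerate_append]
  simp [PySem.List.pyGetD_zero, pvFoldlAdd, PySem.List.enumerate_cons, PySem.List.enumerate_nil]
  ring

set_option maxRecDepth 4000 in
theorem pvSym_eq_nat : ∀ n : Nat, n < 107 →
    pvSym (n : Int) = PySem.List.pyGetD pvCharsA (n : Int) ' ' := by decide

theorem pvSym_eq (v : Int) (h0 : 0 ≤ v) (h1 : v < 107) :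
    pvSym v = PySem.List.pyGetD pvCharsA v ' ' := by
  have hv : v = ((v.toNat : Nat) : Int) := (Int.toNat_of_nonneg h0).symm
  rw [hv]; exact pvSym_eq_nat v.toNat (by omega)

theorem pvInv_step (codes : List Int) (st : List Char × Int × Int) (v : Int)
    (h : pvInv codes st) (h0 : 0 ≤ v) (h1 : v < 107) :
    pvInv (codes ++ [v]) (st.1 ++ [pvSym v], st.2.1 + st.2.2 * v, st.2.2 + 1) := by
  obtain ⟨hm, hw, hk, hne, hb⟩ := h
  refine ⟨?_, ?_, ?_, by simp, ?_⟩
  · simp [hm, pvSym_eq v h0 h1]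
  · simp only [hw, hk, pvWsum_append codes v hne]
  · simp [hk]
  · intro x hx
    rcases List.mem_append.1 hx with hx | hx
    · exact hb x hx
    · simp at hx; omega

theorem pvInv_init (v : Int) (h0 : 0 ≤ v) (h1 : v < 107) :
    pvInv [v] ([pvSym v], v, 1) := by
  refine ⟨by simp [pvSym_eq v h0 h1], ?_, by simp, by simp, by intro x hx; simp at hx; omega⟩
  simp [pvWsum, PySem.List.enumerate_cons, PySem.List.enumerate_nil, PySem.List.pyGetD_zero]

set_option maxRecDepth 10000 in
theorem pvMappingA_spec : ∀ n : Nat, n < 128 →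
    (pvMappingA.get? (Char.ofNat n)).getD [] =
      if (n : Int) < 32 then [98, (n : Int) + 64] else [(n : Int) - 32] := by decide

theorem pvDigitVal : ∀ a : Nat, a < 10 → ∀ b : Nat, b < 10 →
    (PySem.Int.ofCharsBase? [Char.ofNat (48 + a), Char.ofNat (48 + b)] 10).getD 0 =
      10 * (a : Int) + b := by decide

theorem pvIsdigit_bounds (c : Char) (h : PySem.Chars.isdigit c = true) :
    48 ≤ c.toNat ∧ c.toNat ≤ 57 := by
  simp only [PySem.Chars.isdigit, Bool.and_eq_true, decide_eq_true_eq] at h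
  obtain ⟨h1, h2⟩ := h
  rw [Char.le_def] at h1 h2
  exact ⟨h1, h2⟩

theorem pvC_bound (cs : List Char) (hdig : ∀ c ∈ cs, PySem.Chars.isdigit c = true)
    (heven : cs.length % 2 = 0) :
    ∀ i ∈ PySem.List.pyRange 0 (cs.length : Int) 2,
      0 ≤ (PySem.Int.ofCharsBase? (PySem.List.slice cs (some i) (some (i + 2))) 10).getD 0 ∧
      (PySem.Int.ofCharsBase? (PySem.List.slice cs (some i) (some (i + 2))) 10).getD 0 < 107 := by
  intro i hi
  rw [PySem.List.mem_pyRange_iff_of_pos (by norm_num)] at hi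
  obtain ⟨h0, h1, h2⟩ := hi
  simp only [sub_zero] at h2
  have hit : (i.toNat : Int) = i := Int.toNat_of_nonneg h0
  have hle : i.toNat + 2 ≤ cs.length := by omega
  rw [PySem.List.slice_toNat cs (a := i) (b := i + 2) h0 (by omega)]
  have h2' : (i + 2).toNat - i.toNat = 2 := by omega
  rw [h2']
  have hlen : 2 ≤ (cs.drop i.toNat).length := by simp; omega
  rcases hd : cs.drop i.toNat with _ | ⟨d1, _ | ⟨d2, rest⟩⟩
  · rw [hd] at hlen; simp at hlen
  · rw [hd] at hlen; simp at hlen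
  · have m1 : d1 ∈ cs := List.mem_of_mem_drop (by rw [hd]; exact List.mem_cons_self ..)
    have m2 : d2 ∈ cs := List.mem_of_mem_drop (by rw [hd]; simp)
    obtain ⟨ha1, ha2⟩ := pvIsdigit_bounds d1 (hdig d1 m1)
    obtain ⟨hb1, hb2⟩ := pvIsdigit_bounds d2 (hdig d2 m2)
    have e1 : d1 = Char.ofNat (48 + (d1.toNat - 48)) := by
      rw [show 48 + (d1.toNat - 48) = d1.toNat by omega, Char.ofNat_toNat]
    have e2 : d2 = Char.ofNat (48 + (d2.toNat - 48)) := by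
      rw [show 48 + (d2.toNat - 48) = d2.toNat by omega, Char.ofNat_toNat]
    rw [show (d1 :: d2 :: rest).take 2 = [d1, d2] from rfl, e1, e2,
      pvDigitVal (d1.toNat - 48) (by omega) (d2.toNat - 48) (by omega)]
    omega

theorem pvFoldC (f : Int → Int) (l : List Int)
    (hf : ∀ i ∈ l, 0 ≤ f i ∧ f i < 107) :
    ∀ (codes : List Int) (st : List Char × Int × Int), pvInv codes st →
    pvInv (l.foldl (fun codes i => codes ++ [f i]) codes)
          (l.foldl (fun st i =>
            let v := f i
            (st.1 ++ [pvSym v], st.2.1 + st.2.2 * v, st.2.2 + 1)) st) := by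
  induction l with
  | nil => intro codes st h; simpa using h
  | cons i t ih =>
    intro codes st h
    simp only [List.foldl_cons]
    exact ih (fun j hj => hf j (by simp [hj])) _ _
      (pvInv_step _ _ _ h (hf i (by simp)).1 (hf i (by simp)).2)

theorem pvFoldB (l : List Char) (hl : ∀ c ∈ l, pvDomChar c = true) :
    ∀ (codes : List Int) (st : List Char × Int × Int), pvInv codes st →
    pvInv (l.foldl (fun codes c => codes ++ (pvMappingA.get? c).getD []) codes)
          (l.foldl (fun st c =>
            let o : Int := c.toNat
            if o < 32 then
              let st1 := (st.1 ++ [pvSym 98], st.2.1 + st.2.2 * 98, st.2.2 + 1)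
              (st1.1 ++ [pvSym (o + 64)], st1.2.1 + st1.2.2 * (o + 64), st1.2.2 + 1)
            else
              (st.1 ++ [pvSym (o - 32)], st.2.1 + st.2.2 * (o - 32), st.2.2 + 1)) st) := by
  induction l with
  | nil => intro codes st h; simpa using h
  | cons c t ih =>
    intro codes st h
    have hc := hl c (List.mem_cons_self ..)
    simp only [pvDomChar, Bool.or_eq_true, Bool.and_eq_true, decide_eq_true_eq,
      beq_iff_eq] at hc
    have hlt : c.toNat < 128 := by omega
    have hmap : (pvMappingA.get? c).getD [] =
        if (c.toNat : Int) < 32 then [98, (c.toNat : Int) + 64] else [(c.toNat : Int) - 32] := by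
      have := pvMappingA_spec c.toNat hlt
      rwa [Char.ofNat_toNat] at this
    have htail : ∀ d ∈ t, pvDomChar d = true := fun d hd => hl d (List.mem_cons_of_mem _ hd)
    simp only [List.foldl_cons, hmap]
    by_cases h32 : (c.toNat : Int) < 32
    · rw [if_pos h32, if_pos h32]
      rw [show codes ++ [(98 : Int), (c.toNat : Int) + 64] =
        (codes ++ [98]) ++ [(c.toNat : Int) + 64] by simp]
      exact ih htail _ _
        (pvInv_step _ _ _ (pvInv_step _ _ _ h (by norm_num) (by norm_num))
          (by positivity) (by omega))
    · rw [if_neg h32, if_neg h32]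
      have hub : c.toNat ≤ 126 := by omega
      exact ih htail _ _ (pvInv_step _ _ _ h (by omega) (by omega))

theorem pvInv_main (s : String) (hDom : Dom_encode128 s) :
    pvInv (pvCodesA s) (pvStateB s) := by
  have hDom' : ∀ c ∈ s.toList, pvDomChar c = true := by
    have h := hDom
    unfold Dom_encode128 pvDomStr at h
    simpa [List.all_eq_true] using h
  unfold pvCodesA pvStateB
  by_cases hcond : (PySem.Str.strIsdigit s && (PySem.Int.mod (PySem.Str.len s) 2 == 0)) = true
  · rw [if_pos hcond, if_pos hcond]
    simp only [Bool.and_eq_true, beq_iff_eq] at hcond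
    obtain ⟨hdig, heven⟩ := hcond
    rw [PySem.Str.strIsdigit_eq] at hdig
    simp only [PySem.Chars.strIsdigit, Bool.and_eq_true, List.all_eq_true,
      Bool.not_eq_true', List.isEmpty_eq_false_iff] at hdig
    have heven' : s.toList.length % 2 = 0 := by
      rw [PySem.Str.len_eq] at heven
      rw [PySem.Int.mod_eq_zero_iff_dvd] at heven
      omega
    have hb := pvC_bound s.toList hdig.2 heven'
    rw [PySem.Str.len_eq]
    exact pvFoldC _ _ hb [105] _ (pvInv_init 105 (by norm_num) (by norm_num))
  · rw [if_neg hcond, if_neg hcond]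
    exact pvFoldB s.toList hDom' [104] _ (pvInv_init 104 (by norm_num) (by norm_num))

theorem pvModBounds (a : Int) : 0 ≤ PySem.Int.mod a 103 ∧ PySem.Int.mod a 103 < 103 := by
  unfold PySem.Int.mod
  exact ⟨Int.fmod_nonneg_of_pos a (by norm_num), Int.fmod_lt_of_pos a (by norm_num)⟩

-- ===== VERDICT (by name: the statement is the Claim_ definition above) =====
theorem encode128_spec : Claim_equal_encode128 := by
  intro s hDom
  unfold Spec_encode128 encode128 encode128_alt
  obtain ⟨hm, hw, -, -, -⟩ := pvInv_main s hDom
  simp only []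
  rw [hm, hw]
  have hck := pvModBounds (pvWsum (pvCodesA s))
  rw [pvSym_eq _ hck.1 (by omega), pvSym_eq 106 (by norm_num) (by norm_num), List.map_append]
  rfl
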